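-- pv_equiv track=rewrite | github.com/proboscis/doeff | doeff/cli/discovery.py | _get_module_hierarchy
-- ===== SOURCE A (Python) =====
-- def _get_module_hierarchy(module_path: str) -> list[str]:
--     """Get module hierarchy from root to module.
--
--     Example: "some.module.a" → ["some", "some.module", "some.module.a"]
--     """
--     if not module_path:
--         return []
--
--     parts = module_path.split(".")
--     hierarchy = []
--     for i in range(1, len(parts) + 1):
--         hierarchy.append(".".join(parts[:i]))
--     return hierarchy
-- ===== SOURCE B (Python) =====
-- def _get_module_hierarchy(module_path: str) -> list[str]:
--     """Get module hierarchy from root to module.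
--
--     Example: "some.module.a" → ["some", "some.module", "some.module.a"]
--     """
--     if not module_path:
--         return []
--
--     parts = module_path.split(".")
--     current = parts[0]
--     hierarchy = [current]
--     for part in parts[1:]:
--         current = current + "." + part
--         hierarchy.append(current)
--     return hierarchy
-- ===== Notes on version B (the rewrite author's own statement) =====
-- stated objective: simpler
-- what changed: Instead of recomputing every prefix from scratch with a slice parts[:i] and a join, B keeps one running dotted prefix and extends it by one part per step, emitting it as it goes.
import Mathlib
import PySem

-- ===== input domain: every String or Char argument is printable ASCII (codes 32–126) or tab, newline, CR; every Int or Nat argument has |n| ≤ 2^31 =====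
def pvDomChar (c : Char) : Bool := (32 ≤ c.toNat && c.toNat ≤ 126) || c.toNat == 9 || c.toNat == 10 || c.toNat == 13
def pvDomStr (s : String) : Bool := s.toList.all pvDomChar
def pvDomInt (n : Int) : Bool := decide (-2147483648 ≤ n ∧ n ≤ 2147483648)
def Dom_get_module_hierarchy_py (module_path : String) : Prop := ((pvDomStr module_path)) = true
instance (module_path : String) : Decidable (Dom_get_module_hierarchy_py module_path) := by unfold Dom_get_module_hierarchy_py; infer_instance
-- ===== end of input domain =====

-- B replaces A's per-index slice-and-join rebuild of each prefix by a single running-prefix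
-- accumulation (objective: simpler); return values proved equal on all inputs.


-- ===== PORT A =====
-- module_path.split(".") — sep "." ≠ "" so split? is always `some`; the getD default is never used
def get_module_hierarchy_py (module_path : String) : List String :=
  if module_path = "" then []
  else
    let parts := (PySem.Str.split? module_path ".").getD []
    (PySem.List.pyRange 1 ((parts.length : Int) + 1) 1).foldl
      (fun hierarchy i => hierarchy ++ [PySem.Str.join "." (PySem.List.slice parts none (some i))]) []

-- ===== PORT B =====
-- the loop `for part in parts[1:]: current = current + "." + part; hierarchy.append(current)`
-- as structural recursion on the remaining parts, carrying the running prefix `current`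
def pvRunningPrefixes (current : String) : List String → List String
  | [] => [current]
  | part :: rest => current :: pvRunningPrefixes (current ++ "." ++ part) rest

def get_module_hierarchy_py_alt (module_path : String) : List String :=
  if module_path = "" then []
  else
    match (PySem.Str.split? module_path ".").getD [] with
    | [] => []
    | p :: rest => pvRunningPrefixes p rest

-- ===== PRECONDITION & SPEC =====
def Spec_get_module_hierarchy_py (module_path : String) (out : List String) : Prop := out = get_module_hierarchy_py_alt module_path
instance (module_path : String) (out : List String) : Decidable (Spec_get_module_hierarchy_py module_path out) := by unfold Spec_get_module_hierarchy_py; infer_instance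

-- ===== CLAIM (what is proved, stated in full; the proofs are below) =====
def Claim_equal_get_module_hierarchy_py : Prop := ∀ (module_path : String), Dom_get_module_hierarchy_py module_path → Spec_get_module_hierarchy_py module_path (get_module_hierarchy_py module_path)

-- ===== LEMMAS AND PROOFS =====

-- ".".join([p]) = p
lemma str_join_singleton (p : String) : PySem.Str.join "." [p] = p := by
  apply String.toList_inj.mp
  simp [PySem.Str.toList_join, PySem.Chars.join_singleton]

-- gluing the head pair: ".".join([p, b, …]) = ".".join([p + "." + b, …])
lemma str_join_glue (p b : String) (l : List String) :
    PySem.Str.join "." (p :: b :: l) = PySem.Str.join "." ((p ++ "." ++ b) :: l) := by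
  apply String.toList_inj.mp
  cases l with
  | nil =>
    simp [PySem.Str.toList_join, PySem.Chars.join_singleton, PySem.Chars.join_cons_cons]
  | cons x xs =>
    simp [PySem.Str.toList_join, PySem.Chars.join_cons_cons]

-- the running-prefix recursion computes exactly the joined takes of p :: rest
lemma runningPrefixes_eq (rest : List String) (p : String) :
    pvRunningPrefixes p rest
      = (List.range (rest.length + 1)).map
          (fun k => PySem.Str.join "." ((p :: rest).take (k + 1))) := by
  induction rest generalizing p with
  | nil => simp [pvRunningPrefixes, str_join_singleton]
  | cons b rs ih =>
    rw [pvRunningPrefixes, ih]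
    conv_rhs => rw [show (b :: rs).length + 1 = (rs.length + 1) + 1 by simp, List.range_succ_eq_map]
    rw [List.map_cons, List.map_map]
    congr 1
    · rw [List.take_succ_cons, List.take_zero, str_join_singleton]
    · apply List.map_congr_left
      intro k _
      simp only [Function.comp_apply, List.take_succ_cons]
      exact (str_join_glue p b (rs.take k)).symm

-- A's slice/join fold over range(1, len+1) equals the joined takes, hence B's recursion
lemma fold_eq_running (parts : List String) :
    (PySem.List.pyRange 1 ((parts.length : Int) + 1) 1).foldl
        (fun hierarchy i => hierarchy ++ [PySem.Str.join "." (PySem.List.slice parts none (some i))]) []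
      = (match parts with
         | [] => []
         | p :: rest => pvRunningPrefixes p rest) := by
  rw [PySem.List.foldl_append_singleton_eq_map, PySem.List.pyRange_one, List.map_map]
  have hlen : ((parts.length : Int) + 1 - 1).toNat = parts.length := by omega
  rw [hlen]
  cases parts with
  | nil => simp
  | cons p rest =>
    show _ = pvRunningPrefixes p rest
    rw [runningPrefixes_eq]
    simp only [List.length_cons, List.nil_append]
    apply List.map_congr_left
    intro k _
    simp only [Function.comp_apply]
    rw [PySem.List.slice_to (p :: rest) (by omega : (0:Int) ≤ 1 + (k : Int))]
    norm_num [Int.toNat_add_nat, add_comm]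

-- ===== VERDICT (by name: the statement is the Claim_ definition above) =====
theorem get_module_hierarchy_py_spec : Claim_equal_get_module_hierarchy_py := by
  intro module_path _
  unfold Spec_get_module_hierarchy_py get_module_hierarchy_py get_module_hierarchy_py_alt
  by_cases h : module_path = ""
  · simp [h]
  · simp only [if_neg h]
    exact fold_eq_running _
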